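-- pv_equiv track=rewrite | github.com/zhengheng36/PythonTests | ProjectEuler/180110_6.py | SumOfSeq
-- ===== SOURCE A (Python) =====
-- def SumOfSeq(num):
--     total2 = 0
--     while True:
--         if num == 0:
--             break
--         total2 = total2 + num
--         num = num - 1
--     return total2 * total2
-- ===== SOURCE B (Python) =====
-- def SumOfSeq(num):
--     s = num * (num + 1) // 2
--     return s * s
-- ===== Notes on version B (the rewrite author's own statement) =====
-- stated objective: faster
-- what changed: Replaced the decrementing while-loop accumulation of 1..num by the closed-form Gauss sum num*(num+1)//2, then squared.
import Mathlib
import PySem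

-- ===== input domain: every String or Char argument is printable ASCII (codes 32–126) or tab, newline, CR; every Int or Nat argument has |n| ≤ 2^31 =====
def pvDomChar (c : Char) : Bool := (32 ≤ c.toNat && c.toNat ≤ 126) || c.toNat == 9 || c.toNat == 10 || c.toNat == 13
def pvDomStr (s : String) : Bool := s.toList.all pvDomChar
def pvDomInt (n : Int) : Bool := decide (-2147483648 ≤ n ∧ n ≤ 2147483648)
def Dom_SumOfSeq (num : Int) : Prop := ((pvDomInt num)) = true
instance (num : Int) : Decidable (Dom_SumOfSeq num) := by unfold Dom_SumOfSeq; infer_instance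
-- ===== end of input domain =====

-- B computes the Gauss closed form (num*(num+1)//2)**2 in O(1) instead of A's O(num) loop.


-- ===== PORT A =====
-- the while-loop: fuel-free structural recursion; the '≤' in the guard only makes
-- the recursion total (Python's loop never terminates for num < 0, see Pre_)
def SumOfSeqGo (num total2 : Int) : Int :=
  if num ≤ 0 then total2
  else SumOfSeqGo (num - 1) (total2 + num)
termination_by num.toNat
decreasing_by omega

def SumOfSeq (num : Int) : Int :=
  let total2 := SumOfSeqGo num 0
  total2 * total2

-- ===== PORT B =====
def SumOfSeq_alt (num : Int) : Int :=
  let s := PySem.Int.floordiv (num * (num + 1)) 2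
  s * s

-- ===== PRECONDITION & SPEC =====
-- Pre_ excludes num < 0, where Python's A loops forever (num never reaches 0).
def Pre_SumOfSeq (num : Int) : Prop := 0 ≤ num
instance (num : Int) : Decidable (Pre_SumOfSeq num) := by unfold Pre_SumOfSeq; infer_instance
def pvWitness_SumOfSeq : Int := (5)

def Spec_SumOfSeq (num : Int) (out : Int) : Prop := out = SumOfSeq_alt num
instance (num : Int) (out : Int) : Decidable (Spec_SumOfSeq num out) := by unfold Spec_SumOfSeq; infer_instance

-- ===== CLAIM (what is proved, stated in full; the proofs are below) =====
def Claim_equal_SumOfSeq : Prop := ∀ (num : Int), Dom_SumOfSeq num → Pre_SumOfSeq num → Spec_SumOfSeq num (SumOfSeq num)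

-- ===== LEMMAS AND PROOFS =====
theorem SumOfSeqGo_eq (num : Int) (h : 0 ≤ num) :
    ∀ total2, SumOfSeqGo num total2 = total2 + PySem.Int.floordiv (num * (num + 1)) 2 := by
  induction num, h using Int.le_induction with
  | base =>
    intro t
    unfold SumOfSeqGo
    norm_num [PySem.Int.floordiv]
  | succ n hn ih =>
    intro t
    unfold SumOfSeqGo
    rw [if_neg (by omega)]
    rw [show n + 1 - 1 = n by ring, ih (t + (n + 1))]
    rw [PySem.Int.floordiv_eq_ediv_of_pos (by omega), PySem.Int.floordiv_eq_ediv_of_pos (by omega)]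
    obtain ⟨k, hk⟩ := Int.even_mul_succ_self n
    have hk : n * (n + 1) = 2 * k := by omega
    have : (n + 1) * (n + 1 + 1) = 2 * (k + (n + 1)) := by nlinarith
    rw [hk, this, Int.mul_ediv_cancel_left _ (by norm_num), Int.mul_ediv_cancel_left _ (by norm_num)]
    ring

-- ===== VERDICT (by name: the statement is the Claim_ definition above) =====
theorem SumOfSeq_spec : Claim_equal_SumOfSeq := by
  intro num _ hpre
  unfold Spec_SumOfSeq SumOfSeq SumOfSeq_alt
  simp only [SumOfSeqGo_eq num hpre, zero_add]
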